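-- pv_equiv track=rewrite | github.com/flairNLP/flair | flair/nn/wikidata_utils.py | map_wikidata_list_to_ner
-- ===== SOURCE A (Python) =====
-- org_classes = ["organization", "political party", "political organization", "confederation", "sports club",
--                "political party", "business", "public company", "type of organisation",
--                "national sports team", "association football club", "sports team", "government organization"
--                ]
--
-- loc_classes = ["state", "country", "city", "classification of human settlements", "human settlement",
--                "geographic entity",
--                "physical location", "U.S. state", "historical country", "island", "geographic region"]
--
-- per_classes = ["human", "person",
--                "Wikimedia human name disambiguation page",
--                ]
--
-- def map_wikidata_list_to_ner(wikidata_classes):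
--
--     tag_dict = {"ORG": False,
--                 "LOC": False,
--                 "PER": False,
--                 "MISC": False}
--
--     for c in wikidata_classes:
--         if c in per_classes:
--             tag_dict["PER"] = True
--         if c in loc_classes:
--             tag_dict["LOC"] = True
--         if c in org_classes:
--             tag_dict["ORG"] = True
--
--     # if no rule applied? --> MISC
--     if not True in tag_dict.values():
--         tag_dict["MISC"] = True
--
--     # if more than one rule applied? --> MISC
--     if sum(tag_dict.values()) > 1:
--         tag_dict["MISC"] = True
--         tag_dict["PER"] = False
--         tag_dict["LOC"] = False
--         tag_dict["ORG"] = False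
--
--     ner_label = [k for k,v in tag_dict.items() if v == True][0]
--
--     return ner_label, tag_dict
-- ===== SOURCE B (Python) =====
-- org_classes = ["organization", "political party", "political organization", "confederation", "sports club",
--                "political party", "business", "public company", "type of organisation",
--                "national sports team", "association football club", "sports team", "government organization"
--                ]
--
-- loc_classes = ["state", "country", "city", "classification of human settlements", "human settlement",
--                "geographic entity",
--                "physical location", "U.S. state", "historical country", "island", "geographic region"]
--
-- per_classes = ["human", "person",
--                "Wikimedia human name disambiguation page",
--                ]
--
-- def _matches_any(wikidata_classes, cls):
--     return any(c in cls for c in wikidata_classes)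
--
-- def map_wikidata_list_to_ner(wikidata_classes):
--     matched = [cat for cat, cls in (("ORG", org_classes), ("LOC", loc_classes), ("PER", per_classes))
--                if _matches_any(wikidata_classes, cls)]
--     ner_label = matched[0] if len(matched) == 1 else "MISC"
--     tag_dict = {k: k == ner_label for k in ("ORG", "LOC", "PER", "MISC")}
--     return ner_label, tag_dict
-- ===== Notes on version B (the rewrite author's own statement) =====
-- stated objective: simpler
-- what changed: B replaces A's mutable flag-dict with two post-hoc correction passes (no-match->MISC, multi-match->reset+MISC) by a direct count-based decision: collect the matched categories once, pick the label by len(matched)==1, and build the tag dict from that label in one comprehension.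
import Mathlib
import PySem

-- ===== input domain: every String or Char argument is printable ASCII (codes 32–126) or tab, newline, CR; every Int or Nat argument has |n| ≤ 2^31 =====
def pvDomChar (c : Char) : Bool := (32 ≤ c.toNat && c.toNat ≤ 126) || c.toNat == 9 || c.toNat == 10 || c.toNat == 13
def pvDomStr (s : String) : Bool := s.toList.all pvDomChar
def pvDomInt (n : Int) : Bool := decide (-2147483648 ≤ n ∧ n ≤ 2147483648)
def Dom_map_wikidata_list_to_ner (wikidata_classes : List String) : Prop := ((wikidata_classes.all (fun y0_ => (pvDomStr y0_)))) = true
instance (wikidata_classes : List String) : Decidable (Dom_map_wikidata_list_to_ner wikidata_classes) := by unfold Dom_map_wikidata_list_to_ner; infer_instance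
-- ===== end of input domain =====

-- B replaces A's mutable flag-dict plus two post-hoc correction passes by a direct
-- count-based decision (collect matched categories, pick by count, build the dict from
-- the chosen label): simpler, same cost.

-- module-level constants shared by both programs
def pvOrgClasses : List String := ["organization", "political party", "political organization", "confederation", "sports club",
               "political party", "business", "public company", "type of organisation",
               "national sports team", "association football club", "sports team", "government organization"]
def pvLocClasses : List String := ["state", "country", "city", "classification of human settlements", "human settlement",
               "geographic entity",
               "physical location", "U.S. state", "historical country", "island", "geographic region"]
def pvPerClasses : List String := ["human", "person",
               "Wikimedia human name disambiguation page"]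

-- ===== PORT A =====
-- the body of A's for-loop over wikidata_classes
def pvStepA (d : PySem.Dict String Bool) (c : String) : PySem.Dict String Bool :=
  let d := if pvPerClasses.contains c then d.insert "PER" true else d
  let d := if pvLocClasses.contains c then d.insert "LOC" true else d
  if pvOrgClasses.contains c then d.insert "ORG" true else d

def map_wikidata_list_to_ner (wikidata_classes : List String) : String × (List (String × Bool)) :=
  let tag0 : PySem.Dict String Bool :=
    PySem.Dict.ofList [("ORG", false), ("LOC", false), ("PER", false), ("MISC", false)]
  let tag := wikidata_classes.foldl pvStepA tag0
  -- if no rule applied? --> MISC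
  let tag := if ¬ (tag.values.contains true) then tag.insert "MISC" true else tag
  -- if more than one rule applied? --> MISC
  let tag := if (tag.values.foldl (fun (s : Int) v => s + (if v then 1 else 0)) 0) > 1 then
      ((((tag.insert "MISC" true).insert "PER" false).insert "LOC" false).insert "ORG" false)
    else tag
  -- [k for k,v in tag_dict.items() if v == True][0]; the list is provably nonempty here,
  -- so the pyGet?/getD "" never takes the default
  let ner := ((PySem.List.pyGet? ((tag.items.filter (fun kv : String × Bool => kv.2 == true)).map Prod.fst) 0).getD "")
  (ner, tag.items)

-- ===== PORT B =====
-- any(c in cls for c in wikidata_classes)  (helper _matches_any in Source B)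
def pvMatchesAny (wikidata_classes : List String) (cls : List String) : Bool :=
  wikidata_classes.any (fun c => cls.contains c)

def map_wikidata_list_to_ner_alt (wikidata_classes : List String) : String × (List (String × Bool)) :=
  let matched := ([("ORG", pvOrgClasses), ("LOC", pvLocClasses), ("PER", pvPerClasses)].filter
      (fun p => pvMatchesAny wikidata_classes p.2)).map Prod.fst
  let ner := if matched.length == 1 then ((PySem.List.pyGet? matched 0).getD "MISC") else "MISC"
  (ner, ["ORG", "LOC", "PER", "MISC"].map (fun k => (k, k == ner)))

-- ===== PRECONDITION & SPEC =====
def Spec_map_wikidata_list_to_ner (wikidata_classes : List String) (out : String × (List (String × Bool))) : Prop := out = map_wikidata_list_to_ner_alt wikidata_classes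
instance (wikidata_classes : List String) (out : String × (List (String × Bool))) : Decidable (Spec_map_wikidata_list_to_ner wikidata_classes out) := by unfold Spec_map_wikidata_list_to_ner; infer_instance

-- ===== CLAIM (what is proved, stated in full; the proofs are below) =====
def Claim_equal_map_wikidata_list_to_ner : Prop := ∀ (wikidata_classes : List String), Dom_map_wikidata_list_to_ner wikidata_classes → Spec_map_wikidata_list_to_ner wikidata_classes (map_wikidata_list_to_ner wikidata_classes)

-- ===== LEMMAS AND PROOFS =====

theorem pvOfListMk (o l p m : Bool) :
    (PySem.Dict.ofList [("ORG", o), ("LOC", l), ("PER", p), ("MISC", m)] : PySem.Dict String Bool)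
      = PySem.Dict.mk [("ORG", o), ("LOC", l), ("PER", p), ("MISC", m)] := rfl

-- insertions at the literal keys of A's four-key dict are rfl on the items list
theorem pvInsertPER (o l p m : Bool) :
    (PySem.Dict.mk [("ORG", o), ("LOC", l), ("PER", p), ("MISC", m)]).insert "PER" true
      = PySem.Dict.mk [("ORG", o), ("LOC", l), ("PER", true), ("MISC", m)] := rfl
theorem pvInsertLOC (o l p m : Bool) :
    (PySem.Dict.mk [("ORG", o), ("LOC", l), ("PER", p), ("MISC", m)]).insert "LOC" true
      = PySem.Dict.mk [("ORG", o), ("LOC", true), ("PER", p), ("MISC", m)] := rfl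
theorem pvInsertORG (o l p m : Bool) :
    (PySem.Dict.mk [("ORG", o), ("LOC", l), ("PER", p), ("MISC", m)]).insert "ORG" true
      = PySem.Dict.mk [("ORG", true), ("LOC", l), ("PER", p), ("MISC", m)] := rfl

-- invariant of A's tagging loop
theorem pvFoldA (ws : List String) (o l p : Bool) :
    ws.foldl pvStepA
      (PySem.Dict.mk [("ORG", o), ("LOC", l), ("PER", p), ("MISC", false)])
    = PySem.Dict.mk [("ORG", o || pvMatchesAny ws pvOrgClasses),
                     ("LOC", l || pvMatchesAny ws pvLocClasses),
                     ("PER", p || pvMatchesAny ws pvPerClasses), ("MISC", false)] := by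
  induction ws generalizing o l p with
  | nil => simp [pvMatchesAny]
  | cons c tl ih =>
    simp only [List.foldl_cons, pvStepA]
    split_ifs with h1 h2 h3 h3 h2 h3 h3 <;>
      simp only [pvInsertPER, pvInsertLOC, pvInsertORG, ih, pvMatchesAny, List.any_cons,
        h1, h2, h3, Bool.true_or, Bool.false_or, Bool.or_true]

-- ===== VERDICT (by name: the statement is the Claim_ definition above) =====
theorem map_wikidata_list_to_ner_spec : Claim_equal_map_wikidata_list_to_ner := by
  intro ws _
  show map_wikidata_list_to_ner ws = map_wikidata_list_to_ner_alt ws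
  unfold map_wikidata_list_to_ner map_wikidata_list_to_ner_alt
  simp only [pvOfListMk, pvFoldA, List.filter_cons, List.filter_nil]
  generalize pvMatchesAny ws pvOrgClasses = o
  generalize pvMatchesAny ws pvLocClasses = l
  generalize pvMatchesAny ws pvPerClasses = p
  cases o <;> cases l <;> cases p <;> rfl
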